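-- pv_equiv track=rewrite | github.com/Sztranyak-Zsolt/AOC | 2022/day_16.py | yield_bitmap
-- ===== SOURCE A (Python) =====
-- def yield_bitmap(act_bitmap: int, p_part_count: int = 1):
--     act_cache = set()
--     if p_part_count == 1:
--         yield [act_bitmap]
--         return
--     if act_bitmap == 0:
--         yield [0] * p_part_count
--         return
--     for mask in range((1 << act_bitmap.bit_length() - 1)):
--         mask2 = (1 << act_bitmap.bit_length() - 1) | mask
--         if (next_bm := act_bitmap & mask2) in act_cache:
--             continue
--         if next_bm == 0 and act_bitmap != 0:
--             continue
--         act_cache.add(next_bm)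
--         for next_part_bm in yield_bitmap(act_bitmap ^ next_bm, p_part_count - 1):
--             yield [next_bm] + next_part_bm
-- ===== SOURCE B (Python) =====
-- def _submasks(rest):
--     # all submasks of rest in increasing numeric order
--     if rest == 0:
--         return [0]
--     h = 1 << (rest.bit_length() - 1)
--     low = _submasks(rest ^ h)
--     return low + [h | s for s in low]
--
--
-- def yield_bitmap(act_bitmap: int, p_part_count: int = 1):
--     if p_part_count == 1:
--         yield [act_bitmap]
--         return
--     if act_bitmap == 0:
--         yield [0] * p_part_count
--         return
--     top = 1 << (act_bitmap.bit_length() - 1)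
--     for s in _submasks(act_bitmap ^ top):
--         first = top | s
--         for tail in yield_bitmap(act_bitmap ^ first, p_part_count - 1):
--             yield [first] + tail
-- ===== Notes on version B (the rewrite author's own statement) =====
-- stated objective: alternative
-- what changed: A scans all 2^(bit_length-1) masks at every recursion level and deduplicates the induced first parts with a cache set; B recursively builds the list of submasks of the bitmap below its top bit (in increasing order) and iterates exactly over those candidates, so the cache and the full-range scan disappear (the exponential output itself dominates the measured time, so this is not a measured speed-up).
-- outside the precondition, e.g. on yield_bitmap(-5, 2): A returns [[1, -6], [2, -7], [3, -8]], B raises RecursionError; on yield_bitmap(-1, 0): A raises RecursionError, B raises RecursionError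
import Mathlib
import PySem

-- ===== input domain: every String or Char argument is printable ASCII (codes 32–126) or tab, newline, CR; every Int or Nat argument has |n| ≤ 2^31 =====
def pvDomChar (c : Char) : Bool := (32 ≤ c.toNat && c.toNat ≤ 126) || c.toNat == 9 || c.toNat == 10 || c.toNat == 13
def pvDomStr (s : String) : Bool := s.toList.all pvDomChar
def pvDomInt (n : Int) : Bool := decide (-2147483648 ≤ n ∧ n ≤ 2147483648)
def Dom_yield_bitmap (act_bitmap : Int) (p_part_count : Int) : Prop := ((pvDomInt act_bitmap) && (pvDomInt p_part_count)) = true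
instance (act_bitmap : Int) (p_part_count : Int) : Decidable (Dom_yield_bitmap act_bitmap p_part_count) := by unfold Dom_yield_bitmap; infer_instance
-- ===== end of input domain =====

-- B replaces A's scan of every mask below the top bit (deduplicated through a cache set) by a direct
-- recursive enumeration of the submasks of the bitmap without its top bit, in increasing order, so the
-- cache and the full-range scan disappear. Both Pythons are generators; the ported value is list(...).
-- Pre_ restricts to the natural domain act_bitmap ≥ 0 (or the trivial p = 1 case):
-- a negative "bitmap" makes A recurse without bound for p_part_count ≤ 0 and produce two's-complement
-- artefacts otherwise, where B's submask recursion itself raises.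


-- ===== PORT A =====
-- fuel = act_bitmap.toNat + p_part_count.toNat + 1 bounds the recursion depth (each recursive call
-- strictly lowers a nonnegative act_bitmap or decreases p_part_count toward 1); wherever the Python
-- terminates the fuel is never exhausted.
def yfuelA : Nat → Int → Int → List (List Int)
  | 0, _, _ => []
  | n+1, act_bitmap, p_part_count =>
    if p_part_count = 1 then [[act_bitmap]]
    else if act_bitmap = 0 then [List.replicate p_part_count.toNat 0]
    else
      let top : Int := (1 : Int) <<< (PySem.Int.bitLength act_bitmap - 1)
      ((PySem.List.pyRange 0 top 1).foldl
        (fun st mask =>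
          let mask2 := PySem.Int.bor top mask
          let next_bm := PySem.Int.band act_bitmap mask2
          if next_bm ∈ st.1 then st
          else if next_bm = 0 ∧ act_bitmap ≠ 0 then st
          else (PySem.Set.add st.1 next_bm,
                st.2 ++ (yfuelA n (PySem.Int.bxor act_bitmap next_bm) (p_part_count - 1)).map
                          (fun t => next_bm :: t)))
        ((PySem.Set.empty : PySem.Set Int), ([] : List (List Int)))).2

def yield_bitmap (act_bitmap : Int) (p_part_count : Int) : List (List Int) :=
  yfuelA (act_bitmap.toNat + p_part_count.toNat + 1) act_bitmap p_part_count

-- ===== PORT B =====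
-- fuel = rest.toNat + 1 (resp. act_bitmap.toNat + 1): each call strictly lowers the nonnegative argument.
def submasksB : Nat → Int → List Int
  | 0, _ => []
  | n+1, rest =>
    if rest = 0 then [0]
    else
      let h : Int := (1 : Int) <<< (PySem.Int.bitLength rest - 1)
      let low := submasksB n (PySem.Int.bxor rest h)
      low ++ low.map (fun s => PySem.Int.bor h s)

def yfuelB : Nat → Int → Int → List (List Int)
  | 0, _, _ => []
  | n+1, act_bitmap, p_part_count =>
    if p_part_count = 1 then [[act_bitmap]]
    else if act_bitmap = 0 then [List.replicate p_part_count.toNat 0]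
    else
      let top : Int := (1 : Int) <<< (PySem.Int.bitLength act_bitmap - 1)
      let rest := PySem.Int.bxor act_bitmap top
      (submasksB (rest.toNat + 1) rest).flatMap
        (fun s =>
          let first := PySem.Int.bor top s
          (yfuelB n (PySem.Int.bxor act_bitmap first) (p_part_count - 1)).map
            (fun t => first :: t))

def yield_bitmap_alt (act_bitmap : Int) (p_part_count : Int) : List (List Int) :=
  yfuelB (act_bitmap.toNat + p_part_count.toNat + 1) act_bitmap p_part_count

-- ===== PRECONDITION & SPEC =====
-- Pre_ excludes negative act_bitmap with p_part_count ≠ 1 (a negative int is not a bitmap of valves):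
-- there A either recurses without bound (p_part_count ≤ 0, RecursionError) or returns two's-complement
-- artefacts, and B's submask recursion itself raises; the trivial p_part_count = 1 case is kept for all ints.
def Pre_yield_bitmap (act_bitmap : Int) (p_part_count : Int) : Prop :=
  0 ≤ act_bitmap ∨ p_part_count = 1
instance (act_bitmap : Int) (p_part_count : Int) : Decidable (Pre_yield_bitmap act_bitmap p_part_count) := by
  unfold Pre_yield_bitmap; infer_instance

def pvWitness_yield_bitmap : Int × Int := (13, 3)

def Spec_yield_bitmap (act_bitmap : Int) (p_part_count : Int) (out : List (List Int)) : Prop := out = yield_bitmap_alt act_bitmap p_part_count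
instance (act_bitmap : Int) (p_part_count : Int) (out : List (List Int)) : Decidable (Spec_yield_bitmap act_bitmap p_part_count out) := by unfold Spec_yield_bitmap; infer_instance

-- ===== CLAIM (what is proved, stated in full; the proofs are below) =====
def Claim_equal_yield_bitmap : Prop := ∀ (act_bitmap : Int) (p_part_count : Int), Dom_yield_bitmap act_bitmap p_part_count → Pre_yield_bitmap act_bitmap p_part_count → Spec_yield_bitmap act_bitmap p_part_count (yield_bitmap act_bitmap p_part_count)

-- ===== LEMMAS AND PROOFS =====

/-- First-occurrence deduplication with an explicit seen-list (the cache of A's loop). -/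
def eDF {α : Type} [DecidableEq α] : List α → List α → List α
  | _, [] => []
  | seen, v :: vs => if v ∈ seen then eDF seen vs else v :: eDF (seen ++ [v]) vs

theorem mem_eDF {α : Type} [DecidableEq α] (y : α) :
    ∀ (l seen : List α), y ∈ eDF seen l ↔ y ∈ l ∧ y ∉ seen := by
  intro l
  induction l with
  | nil => intro seen; simp [eDF]
  | cons v vs ih =>
    intro seen
    by_cases hv : v ∈ seen
    · simp only [eDF, if_pos hv, ih]
      constructor
      · rintro ⟨h1, h2⟩; exact ⟨List.mem_cons_of_mem _ h1, h2⟩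
      · rintro ⟨h1, h2⟩
        rcases List.mem_cons.1 h1 with rfl | h1
        · exact absurd hv h2
        · exact ⟨h1, h2⟩
    · simp only [eDF, if_neg hv, List.mem_cons, ih, List.mem_append, List.mem_singleton]
      by_cases hyv : y = v
      · subst hyv; simp [hv]
      · simp [hyv]

theorem eDF_append {α : Type} [DecidableEq α] :
    ∀ (xs ys seen : List α), eDF seen (xs ++ ys) = eDF seen xs ++ eDF (seen ++ eDF seen xs) ys := by
  intro xs
  induction xs with
  | nil => intro ys seen; simp [eDF]
  | cons v vs ih =>
    intro ys seen
    by_cases hv : v ∈ seen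
    · simp [eDF, if_pos hv, ih]
    · simp only [List.cons_append, eDF, if_neg hv, ih, List.append_assoc,
        List.singleton_append, List.nil_append]

theorem eDF_nil_of_subset {α : Type} [DecidableEq α] :
    ∀ (ys seen : List α), (∀ y ∈ ys, y ∈ seen) → eDF seen ys = [] := by
  intro ys
  induction ys with
  | nil => intro seen _; simp [eDF]
  | cons v vs ih =>
    intro seen h
    have hv : v ∈ seen := h v (List.mem_cons_self)
    simp only [eDF, if_pos hv]
    exact ih seen fun y hy => h y (List.mem_cons_of_mem _ hy)

theorem eDF_congr_seen {α : Type} [DecidableEq α] :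
    ∀ (ys s₁ s₂ : List α), (∀ y ∈ ys, (y ∈ s₁ ↔ y ∈ s₂)) → eDF s₁ ys = eDF s₂ ys := by
  intro ys
  induction ys with
  | nil => intro _ _ _; simp [eDF]
  | cons v vs ih =>
    intro s₁ s₂ h
    have hv := h v (List.mem_cons_self)
    by_cases h1 : v ∈ s₁
    · simp only [eDF, if_pos h1, if_pos (hv.1 h1)]
      exact ih _ _ fun y hy => h y (List.mem_cons_of_mem _ hy)
    · have h2 : v ∉ s₂ := fun hc => h1 (hv.2 hc)
      simp only [eDF, if_neg h1, if_neg h2]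
      congr 1
      exact ih _ _ fun y hy => by
        simp only [List.mem_append, List.mem_singleton, h y (List.mem_cons_of_mem _ hy)]
  
theorem eDF_map {α β : Type} [DecidableEq α] [DecidableEq β] (g : α → β)
    (hg : Function.Injective g) :
    ∀ (l seen : List α), eDF (seen.map g) (l.map g) = (eDF seen l).map g := by
  intro l
  induction l with
  | nil => intro seen; simp [eDF]
  | cons v vs ih =>
    intro seen
    by_cases hv : v ∈ seen
    · have : g v ∈ seen.map g := List.mem_map_of_mem hv
      simp only [List.map_cons, eDF, if_pos this, if_pos hv, ih]
    · have : g v ∉ seen.map g := by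
        intro hc
        rcases List.mem_map.1 hc with ⟨w, hw, hgw⟩
        exact hv (hg hgw ▸ hw)
      simp only [List.map_cons, eDF, if_neg this, if_neg hv, List.map_cons]
      rw [← ih (seen ++ [v]), List.map_append, List.map_singleton]

-- ---- bit lemmas on Nat ----

theorem testBit_div_mod (n i : Nat) : n.testBit i = decide (n / 2 ^ i % 2 = 1) := by
  rw [Nat.testBit, Nat.shiftRight_eq_div_pow]
  rcases Nat.mod_two_eq_zero_or_one (n / 2 ^ i) with h | h
  · simp [Nat.and_one_is_mod, h]
  · simp [Nat.and_one_is_mod, h]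

theorem testBit_two_pow_add (k m i : Nat) (h : m < 2 ^ k) :
    (2 ^ k + m).testBit i = ((2 ^ k).testBit i || m.testBit i) := by
  rcases Nat.lt_trichotomy i k with hi | rfl | hi
  · have hne : k ≠ i := by omega
    rw [Nat.testBit_two_pow, decide_eq_false hne, Bool.false_or]
    rw [testBit_div_mod, testBit_div_mod]
    have hk : 2 ^ k = 2 ^ (k - i - 1) * 2 * 2 ^ i := by
      rw [mul_assoc, ← pow_succ', ← pow_add]
      congr 1
      omega
    rw [Nat.add_comm, hk, Nat.add_mul_div_right _ _ (Nat.two_pow_pos i), Nat.add_mul_mod_self_right]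
  · rw [Nat.testBit_two_pow, decide_eq_true rfl, Bool.true_or]
    rw [testBit_div_mod]
    have : (2 ^ i + m) / 2 ^ i = 1 := by
      rw [Nat.add_div_left _ (Nat.two_pow_pos i), Nat.div_eq_of_lt h]
    simp [this]
  · have h1 : 2 ^ k + m < 2 ^ i := by
      have : 2 ^ (k + 1) ≤ 2 ^ i := Nat.pow_le_pow_right (by norm_num) hi
      have : 2 ^ k + m < 2 ^ (k + 1) := by rw [pow_succ]; omega
      omega
    have hne : k ≠ i := by omega
    rw [Nat.testBit_lt_two_pow h1, Nat.testBit_two_pow, decide_eq_false hne,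
      Nat.testBit_lt_two_pow (lt_trans h (Nat.pow_lt_pow_right (by norm_num) hi))]
    rfl

theorem lor_two_pow_of_lt {k m : Nat} (h : m < 2 ^ k) : 2 ^ k ||| m = 2 ^ k + m := by
  apply Nat.eq_of_testBit_eq
  intro i
  rw [Nat.testBit_lor, testBit_two_pow_add k m i h]

theorem band_lor_two_pow_left {k r m : Nat} (hr : r < 2 ^ k) :
    r &&& (2 ^ k ||| m) = r &&& m := by
  apply Nat.eq_of_testBit_eq
  intro i
  simp only [Nat.testBit_land, Nat.testBit_lor, Nat.testBit_two_pow]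
  by_cases hik : k = i
  · subst hik
    rw [Nat.testBit_lt_two_pow hr]
    simp
  · simp [hik]

theorem lor_two_pow_band_right {k r m : Nat} (hm : m < 2 ^ k) :
    (2 ^ k ||| r) &&& m = r &&& m := by
  apply Nat.eq_of_testBit_eq
  intro i
  simp only [Nat.testBit_land, Nat.testBit_lor, Nat.testBit_two_pow]
  by_cases hik : k = i
  · subst hik
    rw [Nat.testBit_lt_two_pow hm]
    simp
  · simp [hik]

theorem lor_band_lor {k r m : Nat} (hr : r < 2 ^ k) (hm : m < 2 ^ k) :
    (2 ^ k ||| r) &&& (2 ^ k ||| m) = 2 ^ k ||| (r &&& m) := by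
  apply Nat.eq_of_testBit_eq
  intro i
  simp only [Nat.testBit_land, Nat.testBit_lor, Nat.testBit_two_pow]
  by_cases hik : k = i
  · simp [hik]
  · simp [hik]

theorem lor_xor_lor {k r m : Nat} (hr : r < 2 ^ k) (hm : m < 2 ^ k) :
    (2 ^ k ||| r) ^^^ (2 ^ k ||| m) = r ^^^ m := by
  apply Nat.eq_of_testBit_eq
  intro i
  simp only [Nat.testBit_xor, Nat.testBit_lor, Nat.testBit_two_pow]
  by_cases hik : k = i
  · subst hik
    rw [Nat.testBit_lt_two_pow hr, Nat.testBit_lt_two_pow hm]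
    simp
  · simp [hik]

theorem size_eq_of (k a : Nat) (h1 : 2 ^ k ≤ a) (h2 : a < 2 ^ (k + 1)) : Nat.size a = k + 1 :=
  le_antisymm (Nat.size_le.2 h2) (Nat.lt_size.2 h1)

theorem bitLength_natCast_size (a : Nat) : PySem.Int.bitLength (a : Int) = Nat.size a := by
  rcases Nat.eq_zero_or_pos a with rfl | ha
  · decide
  · have h1 := PySem.Int.lt_two_pow_bitLength (a : Int)
    have h2 := PySem.Int.two_pow_bitLength_le (a : Int) (by exact_mod_cast ha.ne')
    rw [Int.natAbs_natCast] at h1 h2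
    have hbl : PySem.Int.bitLength (a : Int) ≠ 0 := by
      intro h
      rw [h] at h1
      omega
    have hs1 : Nat.size a ≤ PySem.Int.bitLength (a : Int) := Nat.size_le.2 h1
    have hs2 : PySem.Int.bitLength (a : Int) - 1 < Nat.size a := Nat.lt_size.2 h2
    omega

-- ---- Nat-level submask list and its characterisation ----

def subsF : Nat → Nat → List Nat
  | 0, _ => []
  | n+1, r =>
    if r = 0 then [0]
    else
      let h := 2 ^ (Nat.size r - 1)
      let low := subsF n (r ^^^ h)
      low ++ low.map (fun s => h ||| s)

theorem size_pos_facts (r : Nat) (hr : r ≠ 0) :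
    2 ^ (Nat.size r - 1) ≤ r ∧ r < 2 ^ (Nat.size r - 1) * 2 := by
  have hpos : 0 < Nat.size r := Nat.size_pos.2 (Nat.pos_of_ne_zero hr)
  constructor
  · exact Nat.lt_size.1 (by omega)
  · have := Nat.lt_size_self r
    calc r < 2 ^ Nat.size r := this
    _ = 2 ^ (Nat.size r - 1) * 2 := by rw [← pow_succ]; congr 1; omega

theorem xor_top_eq_sub (r : Nat) (hr : r ≠ 0) :
    r ^^^ 2 ^ (Nat.size r - 1) = r - 2 ^ (Nat.size r - 1) ∧
    r - 2 ^ (Nat.size r - 1) < 2 ^ (Nat.size r - 1) := by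
  obtain ⟨h1, h2⟩ := size_pos_facts r hr
  set k := Nat.size r - 1
  have hm : r - 2 ^ k < 2 ^ k := by omega
  have hrepr : r = 2 ^ k ||| (r - 2 ^ k) := by rw [lor_two_pow_of_lt hm]; omega
  constructor
  · conv_lhs => rw [hrepr]
    have h0 : (0 : Nat) < 2 ^ k := Nat.two_pow_pos k
    calc (2 ^ k ||| (r - 2 ^ k)) ^^^ 2 ^ k
        = (2 ^ k ||| (r - 2 ^ k)) ^^^ (2 ^ k ||| 0) := by rw [Nat.or_zero]
      _ = (r - 2 ^ k) ^^^ 0 := lor_xor_lor hm h0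
      _ = r - 2 ^ k := Nat.xor_zero _
  · exact hm

theorem subsF_congr : ∀ (n n' r : Nat), r < n → r < n' → subsF n r = subsF n' r := by
  intro n
  induction n with
  | zero => intro n' r h _; omega
  | succ n ih =>
    intro n' r h h'
    cases n' with
    | zero => omega
    | succ n' =>
      rcases Nat.eq_zero_or_pos r with rfl | hr
      · simp [subsF]
      · have hne : r ≠ 0 := hr.ne'
        obtain ⟨hx, hlt⟩ := xor_top_eq_sub r hne
        obtain ⟨hle, _⟩ := size_pos_facts r hne
        have hdec : r ^^^ 2 ^ (Nat.size r - 1) < r := by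
          rw [hx]
          have : 0 < 2 ^ (Nat.size r - 1) := Nat.two_pow_pos _
          omega
        simp only [subsF, if_neg hne]
        rw [ih n' (r ^^^ 2 ^ (Nat.size r - 1)) (by omega) (by omega)]

theorem mem_subsF_le : ∀ (n r v : Nat), v ∈ subsF n r → v ≤ r := by
  intro n
  induction n with
  | zero => intro r v h; simp [subsF] at h
  | succ n ih =>
    intro r v h
    rcases Nat.eq_zero_or_pos r with rfl | hr
    · simp [subsF] at h
      omega
    · have hne : r ≠ 0 := hr.ne'
      obtain ⟨hx, hlt⟩ := xor_top_eq_sub r hne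
      obtain ⟨hle, _⟩ := size_pos_facts r hne
      simp only [subsF, if_neg hne, List.mem_append, List.mem_map] at h
      rcases h with h | ⟨w, hw, rfl⟩
      · have := ih _ _ h
        omega
      · have hwle := ih _ _ hw
        rw [hx] at hwle
        rw [lor_two_pow_of_lt (by omega)]
        omega

theorem key_eDF : ∀ (k r : Nat), r < 2 ^ k →
    eDF ([] : List Nat) ((List.range (2 ^ k)).map (fun m => r &&& m)) = subsF (r + 1) r := by
  intro k
  induction k with
  | zero =>
    intro r hr
    interval_cases r
    simp [eDF, subsF]
  | succ k ih =>
    intro r hr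
    have hsplit : List.range (2 ^ (k + 1)) =
        List.range (2 ^ k) ++ (List.range (2 ^ k)).map (fun x => 2 ^ k + x) := by
      rw [pow_succ, mul_two, List.range_add]
    rw [hsplit, List.map_append, List.map_map]
    by_cases hcase : r < 2 ^ k
    · -- second half repeats the first half
      have hmap : (List.range (2 ^ k)).map ((fun m => r &&& m) ∘ fun x => 2 ^ k + x)
          = (List.range (2 ^ k)).map (fun m => r &&& m) := by
        apply List.map_congr_left
        intro x hx
        have hxlt : x < 2 ^ k := List.mem_range.1 hx
        simp only [Function.comp]
        rw [← lor_two_pow_of_lt hxlt, band_lor_two_pow_left hcase]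
      rw [hmap, eDF_append]
      simp only [List.nil_append]
      have hnil : eDF (eDF ([] : List Nat) ((List.range (2 ^ k)).map (fun m => r &&& m)))
          ((List.range (2 ^ k)).map (fun m => r &&& m)) = [] := by
        apply eDF_nil_of_subset
        intro y hy
        rw [mem_eDF]
        exact ⟨hy, by simp⟩
      rw [hnil, List.append_nil]
      exact ih r hcase
    · -- top bit of r is 2^k
      push_neg at hcase
      set r' := r - 2 ^ k with hr'
      have hr'lt : r' < 2 ^ k := by
        have h2 := hr
        rw [pow_succ] at h2
        omega
      have hrepr : r = 2 ^ k ||| r' := by rw [lor_two_pow_of_lt hr'lt]; omega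
      have hfirst : (List.range (2 ^ k)).map (fun m => r &&& m)
          = (List.range (2 ^ k)).map (fun m => r' &&& m) := by
        apply List.map_congr_left
        intro x hx
        rw [hrepr, lor_two_pow_band_right (List.mem_range.1 hx)]
      have hsecond : (List.range (2 ^ k)).map ((fun m => r &&& m) ∘ fun x => 2 ^ k + x)
          = ((List.range (2 ^ k)).map (fun m => r' &&& m)).map (fun v => 2 ^ k + v) := by
        rw [List.map_map]
        apply List.map_congr_left
        intro x hx
        have hxlt : x < 2 ^ k := List.mem_range.1 hx
        simp only [Function.comp]
        rw [hrepr, ← lor_two_pow_of_lt hxlt, lor_band_lor hr'lt hxlt,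
          lor_two_pow_of_lt (Nat.lt_of_le_of_lt Nat.and_le_left hr'lt)]
      set xs := (List.range (2 ^ k)).map (fun m => r' &&& m) with hxs
      have hxslt : ∀ v ∈ xs, v < 2 ^ k := by
        intro v hv
        rcases List.mem_map.1 hv with ⟨x, _, rfl⟩
        exact Nat.lt_of_le_of_lt Nat.and_le_left hr'lt
      rw [hfirst, hsecond, eDF_append]
      simp only [List.nil_append]
      have hseen : eDF (eDF ([] : List Nat) xs) (xs.map (fun v => 2 ^ k + v))
          = eDF ([] : List Nat) (xs.map (fun v => 2 ^ k + v)) := by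
        apply eDF_congr_seen
        intro y hy
        rcases List.mem_map.1 hy with ⟨v, hv, rfl⟩
        have h1 : 2 ^ k + v ∉ eDF ([] : List Nat) xs := by
          intro hc
          have := hxslt _ ((mem_eDF _ _ _).1 hc).1
          omega
        simp [h1]
      have hmapinj : eDF ([] : List Nat) (xs.map (fun v => 2 ^ k + v))
          = (eDF ([] : List Nat) xs).map (fun v => 2 ^ k + v) := by
        have := eDF_map (fun v => 2 ^ k + v) (fun a b h => by simpa using h) xs []
        simpa using this
      rw [hseen, hmapinj, ih r' hr'lt]
      -- now compute subsF (r+1) r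
      have hrne : r ≠ 0 := by have := Nat.two_pow_pos k; omega
      have hsize : Nat.size r = k + 1 := size_eq_of k r hcase hr
      have hxor : r ^^^ 2 ^ (Nat.size r - 1) = r' := by
        obtain ⟨hx, _⟩ := xor_top_eq_sub r hrne
        rw [hx, hsize]
        simp [hr']
      have hfuel : subsF r r' = subsF (r' + 1) r' := by
        apply subsF_congr
        · have : 0 < 2 ^ k := Nat.two_pow_pos k
          omega
        · omega
      have hunf : subsF (r + 1) r
          = subsF (r' + 1) r' ++ (subsF (r' + 1) r').map (fun s => 2 ^ k ||| s) := by
        rw [show subsF (r + 1) r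
            = (if r = 0 then [0]
               else
                 let h := 2 ^ (Nat.size r - 1)
                 let low := subsF r (r ^^^ h)
                 low ++ low.map (fun s => h ||| s)) from rfl]
        rw [if_neg hrne]
        have hxor' : r ^^^ 2 ^ k = r' := by
          have := hxor
          rw [hsize, Nat.add_sub_cancel] at this
          exact this
        simp only [hsize, Nat.add_sub_cancel, hxor']
        rw [hfuel]
      rw [hunf]
      congr 1
      apply List.map_congr_left
      intro v hv
      have hvle : v ≤ r' := mem_subsF_le _ _ _ hv
      rw [lor_two_pow_of_lt (by omega)]

-- ---- A's cached loop as a flatMap over eDF ----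

theorem foldl_cacheA (act top : Int) (rec : Int → List (List Int)) :
    ∀ (ms : List Int) (seen : PySem.Set Int) (acc : List (List Int)),
    (∀ m ∈ ms, PySem.Int.band act (PySem.Int.bor top m) ≠ 0) →
    (ms.foldl
      (fun st mask =>
        if PySem.Int.band act (PySem.Int.bor top mask) ∈ st.1 then st
        else if PySem.Int.band act (PySem.Int.bor top mask) = 0 ∧ act ≠ 0 then st
        else (PySem.Set.add st.1 (PySem.Int.band act (PySem.Int.bor top mask)),
              st.2 ++ (rec (PySem.Int.band act (PySem.Int.bor top mask))).map
                        (fun t => PySem.Int.band act (PySem.Int.bor top mask) :: t)))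
      (seen, acc)).2
    = acc ++ (eDF seen (ms.map (fun m => PySem.Int.band act (PySem.Int.bor top m)))).flatMap
        (fun v => (rec v).map (fun t => v :: t)) := by
  intro ms
  induction ms with
  | nil => intro seen acc _; simp [eDF]
  | cons m ms ih =>
    intro seen acc h0
    have hm0 := h0 m List.mem_cons_self
    simp only [List.foldl_cons, List.map_cons]
    by_cases hmem : PySem.Int.band act (PySem.Int.bor top m) ∈ seen
    · simp only [eDF, if_pos hmem]
      exact ih seen acc fun x hx => h0 x (List.mem_cons_of_mem _ hx)
    · have hcond : ¬(PySem.Int.band act (PySem.Int.bor top m) = 0 ∧ act ≠ 0) := by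
        simp [hm0]
      simp only [eDF, if_neg hmem, if_neg hcond, PySem.Set.add_of_not_mem hmem]
      rw [ih (seen ++ [PySem.Int.band act (PySem.Int.bor top m)]) _
        (fun x hx => h0 x (List.mem_cons_of_mem _ hx))]
      simp [List.append_assoc]

-- ---- bridge: submasksB over a Nat cast ----

theorem submasksB_cast : ∀ (n : Nat) (r : Nat),
    submasksB n (r : Int) = List.map (fun v : Nat => (v : Int)) (subsF n r) := by
  intro n
  induction n with
  | zero => intro r; simp [submasksB, subsF]
  | succ n ih =>
    intro r
    rcases Nat.eq_zero_or_pos r with rfl | hr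
    · simp [submasksB, subsF]
    · have hne : r ≠ 0 := hr.ne'
      have hneZ : (r : Int) ≠ 0 := by exact_mod_cast hne
      simp only [submasksB, subsF, if_neg hne, if_neg hneZ]
      rw [bitLength_natCast_size, Int.shiftLeft_eq, one_mul]
      have hcast : ((2 : Int) ^ (Nat.size r - 1)) = ((2 ^ (Nat.size r - 1) : Nat) : Int) := by
        exact_mod_cast rfl
      rw [hcast]
      have hx : PySem.Int.bxor (r : Int) ((2 ^ (Nat.size r - 1) : Nat) : Int)
          = ((r ^^^ 2 ^ (Nat.size r - 1) : Nat) : Int) := by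
        rw [PySem.Int.bxor_natCast]
      rw [hx, ih]
      rw [List.map_append, List.map_map, List.map_map]
      all_goals
        refine congrArg₂ (· ++ ·) rfl ?_
        refine List.map_congr_left fun v hv => ?_
        show PySem.Int.bor ((2 : Int) ^ (Nat.size r - 1)) (v : Int)
            = ((2 ^ (Nat.size r - 1) ||| v : Nat) : Int)
        rw [hcast, PySem.Int.bor_natCast]

-- ---- main equivalence on nonnegative bitmaps ----

theorem main_eq : ∀ (n : Nat) (a : Nat) (p : Int), a < n →
    yfuelA n (a : Int) p = yfuelB n (a : Int) p := by
  intro n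
  induction n with
  | zero => intro a p h; omega
  | succ n ih =>
    intro a p _h
    by_cases hp : p = 1
    · simp [yfuelA, yfuelB, hp]
    · rcases Nat.eq_zero_or_pos a with rfl | ha
      · simp [yfuelA, yfuelB, hp]
      · have hne : (a : Int) ≠ 0 := by exact_mod_cast ha.ne'
        simp only [yfuelA, yfuelB, if_neg hp, if_neg hne]
        rw [bitLength_natCast_size, Int.shiftLeft_eq, one_mul]
        set k := Nat.size a - 1 with hk
        set S := 2 ^ k with hS
        have hSa : S ≤ a := (size_pos_facts a ha.ne').1
        have haS : a < S * 2 := (size_pos_facts a ha.ne').2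
        set r := a - S with hr
        have hrS : r < S := by
          have : 0 < S := Nat.two_pow_pos k
          omega
        have hrepr : a = S ||| r := by rw [hS, lor_two_pow_of_lt hrS]; omega
        have hcast : ((2 : Int) ^ k) = ((S : Nat) : Int) := by rw [hS]; exact_mod_cast rfl
        rw [hcast]
        -- B side: rest
        have hrest : PySem.Int.bxor (a : Int) ((S : Nat) : Int) = ((r : Nat) : Int) := by
          rw [PySem.Int.bxor_natCast]
          congr 1
          conv_lhs => rw [hrepr]
          have h0 : (0 : Nat) < S := Nat.two_pow_pos k
          calc (S ||| r) ^^^ S = (S ||| r) ^^^ (S ||| 0) := by rw [Nat.or_zero]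
            _ = r ^^^ 0 := by rw [hS]; exact lor_xor_lor hrS (Nat.two_pow_pos k)
            _ = r := Nat.xor_zero r
        rw [hrest]
        have htoNat : ((r : Int)).toNat = r := Int.toNat_natCast r
        rw [htoNat, submasksB_cast]
        -- A side: the range and the cached fold
        have hrange : PySem.List.pyRange 0 ((S : Nat) : Int) 1
            = List.map (fun x : Nat => (x : Int)) (List.range S) := by
          rw [PySem.List.pyRange_one]
          simp
        rw [hrange]
        have hf0 : ∀ m ∈ List.map (fun x : Nat => (x : Int)) (List.range S),
            PySem.Int.band (a : Int) (PySem.Int.bor ((S : Nat) : Int) m) ≠ 0 := by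
          intro m hm
          rcases List.mem_map.1 hm with ⟨x, hx, rfl⟩
          rw [PySem.Int.bor_natCast, PySem.Int.band_natCast]
          have hxlt : x < S := List.mem_range.1 hx
          have : a &&& (S ||| x) = S ||| (r &&& x) := by
            conv_lhs => rw [hrepr]
            rw [hS]
            exact lor_band_lor hrS hxlt
          rw [this]
          have hpos : 0 < S ||| (r &&& x) := by
            have : S ≤ S ||| (r &&& x) := by
              rw [hS, lor_two_pow_of_lt (Nat.lt_of_le_of_lt Nat.and_le_left hrS)]
              omega
            have hS0 : 0 < S := Nat.two_pow_pos k
            omega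
          exact_mod_cast hpos.ne'
        rw [foldl_cacheA (a : Int) ((S : Nat) : Int)
          (fun v => yfuelA n (PySem.Int.bxor (a : Int) v) (p - 1)) _ _ _ hf0]
        simp only [List.nil_append]
        -- identify the deduplicated value list
        have hvals : (List.map (fun x : Nat => (x : Int)) (List.range S)).map
              (fun m => PySem.Int.band (a : Int) (PySem.Int.bor ((S : Nat) : Int) m))
            = List.map (fun v : Nat => (v : Int))
                (((List.range S).map (fun m => r &&& m)).map (fun v => S + v)) := by
          rw [List.map_map, List.map_map, List.map_map]
          apply List.map_congr_left
          intro x hx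
          have hxlt : x < S := List.mem_range.1 hx
          simp only [Function.comp]
          rw [PySem.Int.bor_natCast, PySem.Int.band_natCast]
          congr 1
          conv_lhs => rw [hrepr]
          rw [hS, lor_band_lor hrS hxlt,
            lor_two_pow_of_lt (Nat.lt_of_le_of_lt Nat.and_le_left hrS)]
        rw [hvals]
        set xs := (List.range S).map (fun m => r &&& m) with hxs
        have hxslt : ∀ v ∈ xs, v < S := by
          intro v hv
          rcases List.mem_map.1 hv with ⟨x, _, rfl⟩
          exact Nat.lt_of_le_of_lt Nat.and_le_left hrS
        have hEmpty : (PySem.Set.empty : PySem.Set Int) = List.map (fun v : Nat => (v : Int)) ([] : List Nat) := by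
          rfl
        rw [hEmpty, eDF_map (fun v : Nat => (v : Int)) (fun x y h => by simpa using h)]
        have hEmpty2 : ([] : List Nat) = ([] : List Nat).map (fun v => S + v) := rfl
        rw [hEmpty2, eDF_map (fun v => S + v) (fun x y h => by simpa using h)]
        have hkey : eDF ([] : List Nat) xs = subsF (r + 1) r := key_eDF k r hrS
        rw [hkey]
        -- both sides are flatMaps over (subsF (r+1) r)
        rw [List.map_map, List.flatMap_map, List.flatMap_map]
        apply List.flatMap_congr
        intro s hs
        have hsle : s ≤ r := mem_subsF_le _ _ _ hs
        have hslt : s < S := by omega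
        simp only [Function.comp]
        have hbor : PySem.Int.bor ((S : Nat) : Int) ((s : Nat) : Int) = ((S + s : Nat) : Int) := by
          rw [PySem.Int.bor_natCast]
          congr 1
          rw [hS, lor_two_pow_of_lt hslt]
        rw [hbor]
        have hbx : PySem.Int.bxor (a : Int) ((S + s : Nat) : Int) = ((r ^^^ s : Nat) : Int) := by
          rw [PySem.Int.bxor_natCast]
          congr 1
          conv_lhs => rw [hrepr]
          rw [← lor_two_pow_of_lt hslt, hS]
          exact lor_xor_lor hrS hslt
        rw [hbx]
        have hrec : yfuelA n ((r ^^^ s : Nat) : Int) (p - 1) = yfuelB n ((r ^^^ s : Nat) : Int) (p - 1) := by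
          apply ih
          have hxlt : r ^^^ s < S := Nat.xor_lt_two_pow hrS hslt
          omega
        rw [hrec]

-- ===== VERDICT (by name: the statement is the Claim_ definition above) =====
theorem yield_bitmap_spec : Claim_equal_yield_bitmap := by
  intro act p _hdom hpre
  unfold Spec_yield_bitmap yield_bitmap yield_bitmap_alt
  rcases hpre with hnn | hp1
  · have ha : act = ((act.toNat : Nat) : Int) := (Int.toNat_of_nonneg hnn).symm
    rw [ha]
    rw [Int.toNat_natCast]
    exact main_eq (act.toNat + p.toNat + 1) act.toNat p (by omega)
  · simp [yfuelA, yfuelB, hp1]
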